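-- pv_equiv track=rewrite | github.com/LeonardMH/kos-scripts | ksx.py | min_remove_useless_space
-- ===== SOURCE A (Python) =====
-- flatten = lambda l: [item for sublist in l for item in sublist]
--
-- def min_remove_useless_space(file_oneline):
--     """Remove any extra spacing around things that don't have spacing requirements"""
--     quote_chars = ["'", '"']
--     operators = [",", "*", "/", "^", "+", "-"]
--
--     # bracketsen can also be reduced in the same way as operators are
--     operators += ["{", "}", "(", ")", "[", "]"]
--
--     # iterate over each character of the line and track if we are inside a
--     # string, if not we can remove any spaces surrounding this operator
--     space_locations = []
--     operator_locations = []
--     string_nest_depth = [0, []]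
--
--     for i, char in enumerate(file_oneline):
--         # if we found a string character, increase depth or decrease depending
--         # on what we were expecting to find
--         #
--         # this won't actually work if you have "'" or '"'
--         #
--         # both are valid strings, but won't parse correctly here, I don't think
--         # I have any strings like that at the moment, can deal with it when it
--         # happens
--         if char in quote_chars:
--             if string_nest_depth[0] and char != string_nest_depth[1][-1]:
--                 string_nest_depth[0] = string_nest_depth[0] + 1
--                 string_nest_depth[1].append(char)
--             elif string_nest_depth[0]:
--                 string_nest_depth[0] = string_nest_depth[0] - 1
--                 string_nest_depth[1].pop()
--             continue
--
--         # save indices of space characters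
--         if char == " " and not string_nest_depth[0]:
--             space_locations.append(i)
--             continue
--
--         # save indices of operator characters
--         if char in operators and not string_nest_depth[0]:
--             operator_locations.append(i)
--             continue
--
--     # find strides where an operator is surrounded by spaces
--     space_strides = []
--     for op in operator_locations:
--         first_space, last_space = op, op
--
--         # search forward for spaces
--         for char in file_oneline[op + 1:]:
--             if char != " ":
--                 break
--             last_space += 1
--
--         # search backward for spaces
--         for char in reversed(file_oneline[0:op]):
--             if char != " ":
--                 break
--             first_space -= 1
--
--         # if we found a surrounding space, mark it as a stride
--         if first_space != op or last_space != op: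
--             fs = first_space if first_space is not op else op + 1
--             ls = last_space if last_space is not op else op -1
--             space_strides.append((fs, ls))
--
--     # strides can be flattened to simply a list of indexes of space characters to filter out
--     remove_indices = [
--         x for x in
--         flatten(map(lambda x: range(x[0], x[1] + 1), space_strides))
--         if x not in operator_locations]
--
--     # create a new string with all operator-space strides removed
--     return "".join(c for (i, c) in enumerate(file_oneline) if i not in remove_indices)
-- ===== SOURCE B (Python) =====
-- def min_remove_useless_space(file_oneline):
--     """Remove any extra spacing around things that don't have spacing requirements"""
--     operators = set(",*/^+-{}()[]")
--     out = []
--     pending = 0          # length of the current buffered run of spaces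
--     prev_is_op = False   # whether the last non-space character was an operator
--     for ch in file_oneline:
--         if ch == " ":
--             pending += 1
--         else:
--             if pending:
--                 if not prev_is_op and ch not in operators:
--                     out.append(" " * pending)
--                 pending = 0
--             out.append(ch)
--             prev_is_op = ch in operators
--     if pending and not prev_is_op:
--         out.append(" " * pending)
--     return "".join(out)
-- ===== Notes on version B (the rewrite author's own statement) =====
-- stated objective: faster
-- what changed: Replaces A's multi-pass index machinery (collect operator locations, scan spaces around each operator, build strides, flatten them to an index list, then rebuild the string testing every position against that list) with a single linear pass that buffers each run of spaces and emits it only if neither the preceding nor the following non-space character is an operator.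
import Mathlib
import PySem

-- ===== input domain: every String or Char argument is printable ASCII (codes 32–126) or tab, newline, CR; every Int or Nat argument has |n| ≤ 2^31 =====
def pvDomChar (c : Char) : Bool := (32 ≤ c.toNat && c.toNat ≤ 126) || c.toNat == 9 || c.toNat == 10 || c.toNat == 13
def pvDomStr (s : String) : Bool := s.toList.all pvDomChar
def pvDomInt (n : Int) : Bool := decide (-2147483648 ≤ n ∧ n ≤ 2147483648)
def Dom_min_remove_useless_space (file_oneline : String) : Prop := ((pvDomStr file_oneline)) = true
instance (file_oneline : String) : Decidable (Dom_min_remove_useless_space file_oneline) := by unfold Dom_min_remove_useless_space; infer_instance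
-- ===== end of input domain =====

-- B replaces A's quadratic multi-pass index bookkeeping by one linear pass over the characters (objective: faster).

-- ===== PORT A =====
def pvQuoteChars : List Char := ['\'', '\"']

def pvOperatorsA : List Char := [',', '*', '/', '^', '+', '-'] ++ ['{', '}', '(', ')', '[', ']']

-- one step of A's first for-loop; state = (space_locations, operator_locations, string_nest_depth[0], string_nest_depth[1]).
-- 'string_nest_depth[1][-1]' is read via pyGet? and compared as an Option: Python only evaluates it when the depth is truthy,
-- and then the stack is nonempty on every reachable state (the depth in fact never leaves 0), so the comparison is exact there.
def pvPass1Step (st : List Int × List Int × Int × List Char) (p : Int × Char) :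
    List Int × List Int × Int × List Char :=
  let (sl, ol, d, stk) := st
  let (i, ch) := p
  if ch ∈ pvQuoteChars then
    if d ≠ 0 ∧ some ch ≠ PySem.List.pyGet? stk (-1) then (sl, ol, d + 1, stk ++ [ch])
    else if d ≠ 0 then (sl, ol, d - 1, stk.dropLast)
    else (sl, ol, d, stk)
  else if ch = ' ' ∧ d = 0 then (sl ++ [i], ol, d, stk)
  else if ch ∈ pvOperatorsA ∧ d = 0 then (sl, ol ++ [i], d, stk)
  else (sl, ol, d, stk)

def pvPass1 (l : List Char) : List Int × List Int × Int × List Char :=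
  (PySem.List.enumerate l 0).foldl pvPass1Step ([], [], 0, [])

-- 'for char in …: if char != " ": break; counter += 1' — the number of leading spaces, as the Int the counter accumulates
def pvSpaceCount : List Char → Int
  | [] => 0
  | c :: t => if c ≠ ' ' then 0 else pvSpaceCount t + 1

-- A's second for-loop.  'first_space is not op' / 'last_space is not op': the variables hold the very object 'op' exactly
-- when they were never stepped, so the identity test coincides with '≠' here and is ported as '≠'.
def pvStrides (l : List Char) (ol : List Int) : List (Int × Int) :=
  ol.foldl (fun acc op =>
    let last_space := op + pvSpaceCount (PySem.List.slice l (some (op + 1)) none)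
    let first_space := op - pvSpaceCount ((PySem.List.slice l (some 0) (some op)).reverse)
    if first_space ≠ op ∨ last_space ≠ op then
      acc ++ [(if first_space ≠ op then first_space else op + 1,
               if last_space ≠ op then last_space else op - 1)]
    else acc) []

def pvRemoveIndices (l : List Char) : List Int :=
  let ol := (pvPass1 l).2.1
  (((pvStrides l ol).map (fun x => PySem.List.pyRange x.1 (x.2 + 1) 1)).flatten).filter
    (fun x => ¬ x ∈ ol)

def min_remove_useless_space (file_oneline : String) : String :=
  let l := file_oneline.toList
  String.mk (((PySem.List.enumerate l 0).filter
    (fun p => ¬ p.1 ∈ pvRemoveIndices l)).map (fun p => p.2))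

-- ===== PORT B =====
def pvOperatorsB : PySem.Set Char := PySem.Set.ofList ",*/^+-{}()[]".toList

-- one step of B's single loop; state = (out, pending, prev_is_op)
def pvAltStep (st : List Char × Nat × Bool) (ch : Char) : List Char × Nat × Bool :=
  let (out, pending, prevOp) := st
  if ch = ' ' then (out, pending + 1, prevOp)
  else
    let out := if pending ≠ 0 ∧ ¬ prevOp = true ∧ ¬ ch ∈ pvOperatorsB then
        out ++ List.replicate pending ' '
      else out
    (out ++ [ch], 0, decide (ch ∈ pvOperatorsB))

def min_remove_useless_space_alt (file_oneline : String) : String :=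
  let st := file_oneline.toList.foldl pvAltStep ([], 0, false)
  String.mk (if st.2.1 ≠ 0 ∧ ¬ st.2.2 = true then st.1 ++ List.replicate st.2.1 ' ' else st.1)

-- ===== PRECONDITION & SPEC =====
def Spec_min_remove_useless_space (file_oneline : String) (out : String) : Prop := out = min_remove_useless_space_alt file_oneline
instance (file_oneline : String) (out : String) : Decidable (Spec_min_remove_useless_space file_oneline out) := by unfold Spec_min_remove_useless_space; infer_instance

-- ===== CLAIM (what is proved, stated in full; the proofs are below) =====
def Claim_equal_min_remove_useless_space : Prop := ∀ (file_oneline : String), Dom_min_remove_useless_space file_oneline → Spec_min_remove_useless_space file_oneline (min_remove_useless_space file_oneline)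

-- ===== LEMMAS AND PROOFS =====

-- ---- proof-side notions: the number of leading spaces, and "first non-space char is an operator"

def pvLead : List Char → Nat
  | [] => 0
  | c :: t => if c = ' ' then pvLead t + 1 else 0

def pvOpAfter : List Char → Bool
  | [] => false
  | c :: t => if c = ' ' then pvOpAfter t else decide (c ∈ pvOperatorsA)

-- position i of L is removed: it is a space whose space-run touches an operator on the right or on the left
def pvRem (L : List Char) (i : Nat) : Bool :=
  (L[i]? == some ' ') && (pvOpAfter (L.drop (i + 1)) || pvOpAfter ((L.take i).reverse))

-- the kept characters of L from position k on
def pvMidFrom (L : List Char) (k : Nat) : List Char :=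
  if h : k < L.length then
    (if pvRem L k then pvMidFrom L (k + 1) else L[k] :: pvMidFrom L (k + 1))
  else []
termination_by L.length - k

-- B's loop, unrolled as a recursive function of (prev_is_op, pending, remaining input)
def pvSpecGo (prevOp : Bool) (pending : Nat) : List Char → List Char
  | [] => if pending ≠ 0 ∧ ¬ prevOp = true then List.replicate pending ' ' else []
  | c :: t =>
    if c = ' ' then pvSpecGo prevOp (pending + 1) t
    else (if pending ≠ 0 ∧ ¬ prevOp = true ∧ ¬ c ∈ pvOperatorsB then List.replicate pending ' ' else [])
         ++ c :: pvSpecGo (decide (c ∈ pvOperatorsB)) 0 t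

-- ---- basic facts about pvLead / pvOpAfter / pvSpaceCount

lemma pvLead_le (xs : List Char) : pvLead xs ≤ xs.length := by
  induction xs with
  | nil => simp [pvLead]
  | cons c t ih =>
    by_cases h : c = ' '
    · simp only [pvLead, h, if_true, List.length_cons]; omega
    · simp [pvLead, h]

lemma getElem?_of_lt_pvLead {xs : List Char} {k : Nat} (h : k < pvLead xs) :
    xs[k]? = some ' ' := by
  induction xs generalizing k with
  | nil => simp [pvLead] at h
  | cons c t ih =>
    by_cases hc : c = ' '
    · cases k with
      | zero => simp [hc]
      | succ k => simp only [pvLead, hc, if_true] at h; simpa using ih (by omega)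
    · simp [pvLead, hc] at h

lemma pvLead_ge_of {xs : List Char} {m : Nat} (h : ∀ k, k < m → xs[k]? = some ' ') :
    m ≤ pvLead xs := by
  induction xs generalizing m with
  | nil =>
    cases m with
    | zero => simp
    | succ m => have := h 0 (by omega); simp at this
  | cons c t ih =>
    cases m with
    | zero => omega
    | succ m =>
      have h0 := h 0 (by omega)
      simp at h0
      have : m ≤ pvLead t := ih (fun k hk => by simpa using h (k + 1) (by omega))
      simp only [pvLead, h0, if_true]
      omega

lemma pvOpAfter_replicate_append (m : Nat) (xs : List Char) :
    pvOpAfter (List.replicate m ' ' ++ xs) = pvOpAfter xs := by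
  induction m with
  | zero => simp
  | succ m ih => simpa [List.replicate_succ, pvOpAfter] using ih

lemma pvOpAfter_eq_true_iff (xs : List Char) :
    pvOpAfter xs = true ↔ ∃ c, xs[pvLead xs]? = some c ∧ c ∈ pvOperatorsA := by
  induction xs with
  | nil => simp [pvOpAfter]
  | cons c t ih =>
    by_cases hc : c = ' '
    · simpa [pvOpAfter, pvLead, hc] using ih
    · simp [pvOpAfter, pvLead, hc]

lemma pvSpaceCount_eq_pvLead (xs : List Char) : pvSpaceCount xs = (pvLead xs : Int) := by
  induction xs with
  | nil => simp [pvSpaceCount, pvLead]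
  | cons c t ih =>
    by_cases hc : c = ' '
    · simp only [pvSpaceCount, pvLead, hc]
      simp [ih]
    · simp [pvSpaceCount, pvLead, hc]

-- ---- run-decomposition lemmas

lemma pvSpacesDrop {L : List Char} {a b : Nat} (hab : a ≤ b) (_hb : b ≤ L.length)
    (h : ∀ k, a ≤ k → k < b → L[k]? = some ' ') :
    L.drop a = List.replicate (b - a) ' ' ++ L.drop b := by
  apply List.ext_getElem?
  intro k
  by_cases hk : k < b - a
  · rw [List.getElem?_drop, List.getElem?_append_left (by simpa using hk),
      List.getElem?_replicate]
    simp only [hk, if_true]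
    exact h (a + k) (by omega) (by omega)
  · rw [List.getElem?_drop, List.getElem?_append_right (by simpa using hk)]
    rw [List.getElem?_drop, List.length_replicate]
    congr 1
    omega

lemma pvSpacesTake {L : List Char} {a b : Nat} (hab : a ≤ b) (hb : b ≤ L.length)
    (h : ∀ k, a ≤ k → k < b → L[k]? = some ' ') :
    L.take b = L.take a ++ List.replicate (b - a) ' ' := by
  apply List.ext_getElem?
  intro k
  by_cases hk : k < a
  · rw [List.getElem?_take, List.getElem?_append_left (by simp [List.length_take]; omega),
      List.getElem?_take]
    rw [if_pos hk, if_pos (by omega : k < b)]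
  · by_cases hk2 : k < b
    · rw [List.getElem?_take, List.getElem?_append_right (by simp [List.length_take]; omega),
        List.getElem?_replicate]
      rw [if_pos hk2]
      simp only [List.length_take]
      rw [if_pos (by omega)]
      exact h k (by omega) hk2
    · rw [List.getElem?_take, List.getElem?_append_right (by simp [List.length_take]; omega),
        List.getElem?_replicate]
      rw [if_neg hk2]
      simp only [List.length_take]
      rw [if_neg (by omega)]

lemma pvRevTake_getElem? {L : List Char} {i k : Nat} (hk : k < i) (hi : i ≤ L.length) :
    ((L.take i).reverse)[k]? = L[i - 1 - k]? := by
  have hlen : (L.take i).length = i := by simp; omega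
  rw [List.getElem?_reverse (by omega), hlen, List.getElem?_take]
  rw [if_pos (by omega)]

lemma pvTakeSucc_reverse {L : List Char} {k : Nat} (h : k < L.length) :
    (L.take (k + 1)).reverse = L[k] :: (L.take k).reverse := by
  rw [List.take_succ, List.getElem?_eq_getElem h]
  simp

-- ---- A's first pass

lemma pvQuote_not_op_not_space {c : Char} (h : c ∈ pvQuoteChars) :
    ¬ c = ' ' ∧ ¬ c ∈ pvOperatorsA := by
  rcases (by simpa [pvQuoteChars] using h : c = '\'' ∨ c = '\"') with h | h <;> subst h <;> decide

lemma pvPass1_loop (t : List Char) (s : Int) (sl ol : List Int) (stk : List Char) :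
    (PySem.List.enumerate t s).foldl pvPass1Step (sl, ol, 0, stk)
      = (sl ++ (PySem.List.enumerate t s).filterMap (fun p => if p.2 = ' ' then some p.1 else none),
         ol ++ (PySem.List.enumerate t s).filterMap (fun p => if p.2 ∈ pvOperatorsA then some p.1 else none),
         0, stk) := by
  induction t generalizing s sl ol stk with
  | nil => simp [PySem.List.enumerate_nil]
  | cons c t ih =>
    rw [PySem.List.enumerate_cons]
    simp only [List.foldl_cons, List.filterMap_cons]
    by_cases hq : c ∈ pvQuoteChars
    · obtain ⟨hsp, hop⟩ := pvQuote_not_op_not_space hq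
      have hstep : pvPass1Step (sl, ol, 0, stk) (s, c) = (sl, ol, 0, stk) := by
        simp [pvPass1Step, hq]
      rw [hstep, ih]
      simp [hsp, hop]
    · by_cases hsp : c = ' '
      · have hstep : pvPass1Step (sl, ol, 0, stk) (s, c) = (sl ++ [s], ol, 0, stk) := by
          simp [pvPass1Step, hsp, show ¬ (' ' : Char) ∈ pvQuoteChars by decide]
        rw [hstep, ih]
        simp [hsp, show ¬ (' ' : Char) ∈ pvOperatorsA by decide]
      · by_cases hop : c ∈ pvOperatorsA
        · have hstep : pvPass1Step (sl, ol, 0, stk) (s, c) = (sl, ol ++ [s], 0, stk) := by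
            simp [pvPass1Step, hq, hsp, hop]
          rw [hstep, ih]
          simp [hsp, hop]
        · have hstep : pvPass1Step (sl, ol, 0, stk) (s, c) = (sl, ol, 0, stk) := by
            simp [pvPass1Step, hq, hsp, hop]
          rw [hstep, ih]
          simp [hsp, hop]

lemma pvMem_ol {L : List Char} {x : Int} :
    x ∈ (pvPass1 L).2.1 ↔ ∃ j : Nat, ∃ _ : j < L.length, x = (j : Int) ∧ L[j] ∈ pvOperatorsA := by
  rw [pvPass1, pvPass1_loop]
  simp only [List.nil_append, List.mem_filterMap, PySem.List.mem_enumerate_iff]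
  constructor
  · rintro ⟨p, ⟨k, hk, rfl⟩, hf⟩
    by_cases hm : L[k] ∈ pvOperatorsA
    · refine ⟨k, hk, ?_, hm⟩
      simp only [hm, if_true, Option.some.injEq] at hf
      omega
    · simp [hm] at hf
  · rintro ⟨j, hj, rfl, hm⟩
    exact ⟨((j : Int), L[j]), ⟨j, hj, by simp⟩, by simp [hm]⟩

-- ---- A's stride pass and the removal characterisation

-- the values A's inner scans compute for an operator location op
def pvFirst (L : List Char) (op : Int) : Int :=
  op - pvSpaceCount ((PySem.List.slice L (some 0) (some op)).reverse)

def pvLast (L : List Char) (op : Int) : Int :=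
  op + pvSpaceCount (PySem.List.slice L (some (op + 1)) none)

def pvStridePair (L : List Char) (op : Int) : Int × Int :=
  (if pvFirst L op ≠ op then pvFirst L op else op + 1,
   if pvLast L op ≠ op then pvLast L op else op - 1)

-- the backward / forward space-run lengths at a Nat index
def pvBn (L : List Char) (j : Nat) : Nat := pvLead ((L.take j).reverse)

def pvFn (L : List Char) (j : Nat) : Nat := pvLead (L.drop (j + 1))

lemma pvFirst_eq (L : List Char) (j : Nat) : pvFirst L (j : Int) = (j : Int) - (pvBn L j : Int) := by
  unfold pvFirst pvBn
  rw [PySem.List.slice_zero_start, PySem.List.slice_to_natCast, pvSpaceCount_eq_pvLead]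

lemma pvLast_eq (L : List Char) (j : Nat) : pvLast L (j : Int) = (j : Int) + (pvFn L j : Int) := by
  unfold pvLast pvFn
  rw [show (j : Int) + 1 = ((j + 1 : Nat) : Int) from by push_cast; ring,
    PySem.List.slice_from_natCast, pvSpaceCount_eq_pvLead]

lemma pvBn_le (L : List Char) (j : Nat) (hj : j ≤ L.length) : pvBn L j ≤ j := by
  have := pvLead_le ((L.take j).reverse)
  rw [List.length_reverse, List.length_take] at this
  unfold pvBn
  omega

lemma pvFn_le (L : List Char) (j : Nat) : pvFn L j ≤ L.length - (j + 1) := by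
  have := pvLead_le (L.drop (j + 1))
  simpa [pvFn, List.length_drop] using this

lemma pvSpaces_left (L : List Char) (j : Nat) (hj : j ≤ L.length) :
    ∀ m, j - pvBn L j ≤ m → m < j → L[m]? = some ' ' := by
  intro m h1 h2
  have hk : j - 1 - m < pvBn L j := by omega
  have := getElem?_of_lt_pvLead (xs := (L.take j).reverse) hk
  rw [pvRevTake_getElem? (by omega) hj] at this
  rwa [show j - 1 - (j - 1 - m) = m from by omega] at this

lemma pvSpaces_right (L : List Char) (j : Nat) :
    ∀ m, j + 1 ≤ m → m < j + 1 + pvFn L j → L[m]? = some ' ' := by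
  intro m h1 h2
  have hk : m - (j + 1) < pvFn L j := by omega
  have := getElem?_of_lt_pvLead (xs := L.drop (j + 1)) hk
  rw [List.getElem?_drop] at this
  rwa [show j + 1 + (m - (j + 1)) = m from by omega] at this

lemma pvOpsA_ne_space {c : Char} (h : c ∈ pvOperatorsA) : ¬ c = ' ' := by
  fin_cases h <;> decide

lemma pvOpAfter_right {L : List Char} {i j : Nat} (hij : i < j) (hj : j < L.length)
    (hsp : ∀ m, i + 1 ≤ m → m < j → L[m]? = some ' ') (hop : L[j] ∈ pvOperatorsA) :
    pvOpAfter (L.drop (i + 1)) = true := by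
  rw [pvSpacesDrop (a := i + 1) (b := j) (by omega) (by omega) hsp,
    pvOpAfter_replicate_append, List.drop_eq_getElem_cons hj]
  simp [pvOpAfter, pvOpsA_ne_space hop, hop]

lemma pvOpAfter_left {L : List Char} {i j : Nat} (hij : j < i) (hi : i ≤ L.length)
    (hj : j < L.length) (hsp : ∀ m, j + 1 ≤ m → m < i → L[m]? = some ' ')
    (hop : L[j] ∈ pvOperatorsA) :
    pvOpAfter ((L.take i).reverse) = true := by
  rw [pvSpacesTake (a := j + 1) (b := i) (by omega) hi hsp, List.reverse_append,
    List.reverse_replicate, pvOpAfter_replicate_append, pvTakeSucc_reverse hj]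
  simp [pvOpAfter, pvOpsA_ne_space hop, hop]

lemma pvStrides_fold (L : List Char) (ol : List Int) (acc : List (Int × Int)) :
    ol.foldl (fun acc op =>
      let last_space := op + pvSpaceCount (PySem.List.slice L (some (op + 1)) none)
      let first_space := op - pvSpaceCount ((PySem.List.slice L (some 0) (some op)).reverse)
      if first_space ≠ op ∨ last_space ≠ op then
        acc ++ [(if first_space ≠ op then first_space else op + 1,
                 if last_space ≠ op then last_space else op - 1)]
      else acc) acc
    = acc ++ (ol.filter (fun op => decide (pvFirst L op ≠ op ∨ pvLast L op ≠ op))).map (pvStridePair L) := by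
  induction ol generalizing acc with
  | nil => simp
  | cons op t ih =>
    rw [List.foldl_cons, ih]
    show (if pvFirst L op ≠ op ∨ pvLast L op ≠ op then acc ++ [pvStridePair L op] else acc) ++ _
        = acc ++ List.map (pvStridePair L) (List.filter _ (op :: t))
    rw [List.filter_cons]
    by_cases h : pvFirst L op ≠ op ∨ pvLast L op ≠ op
    · rw [if_pos h, decide_eq_true h]
      simp
    · rw [if_neg h, decide_eq_false h]
      simp

lemma pvStrides_mem (L : List Char) (ol : List Int) (st : Int × Int) :
    st ∈ pvStrides L ol ↔ ∃ op ∈ ol, (pvFirst L op ≠ op ∨ pvLast L op ≠ op) ∧ st = pvStridePair L op := by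
  rw [pvStrides, pvStrides_fold]
  simp only [List.nil_append, List.mem_map, List.mem_filter, decide_eq_true_eq]
  constructor
  · rintro ⟨op, ⟨hmem, hcond⟩, rfl⟩
    exact ⟨op, hmem, hcond, rfl⟩
  · rintro ⟨op, hmem, hcond, rfl⟩
    exact ⟨op, ⟨hmem, hcond⟩, rfl⟩

lemma pvMem_remove_unfold (L : List Char) (x : Int) :
    x ∈ pvRemoveIndices L ↔ ((∃ op ∈ (pvPass1 L).2.1, (pvFirst L op ≠ op ∨ pvLast L op ≠ op) ∧
        x ∈ PySem.List.pyRange (pvStridePair L op).1 ((pvStridePair L op).2 + 1) 1) ∧ ¬ x ∈ (pvPass1 L).2.1) := by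
  unfold pvRemoveIndices
  rw [List.mem_filter]
  simp only [List.mem_flatten, List.mem_map, decide_eq_true_eq]
  constructor
  · rintro ⟨⟨sub, ⟨st, hst, rfl⟩, hx⟩, hnol⟩
    obtain ⟨op, hop, hcond, rfl⟩ := (pvStrides_mem L _ st).mp hst
    exact ⟨⟨op, hop, hcond, hx⟩, hnol⟩
  · rintro ⟨⟨op, hop, hcond, hx⟩, hnol⟩
    exact ⟨⟨_, ⟨pvStridePair L op, (pvStrides_mem L _ _).mpr ⟨op, hop, hcond, rfl⟩, rfl⟩, hx⟩, hnol⟩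

lemma pvMem_remove_iff (L : List Char) (x : Int) :
    x ∈ pvRemoveIndices L ↔ ∃ i : Nat, x = (i : Int) ∧ pvRem L i = true := by
  rw [pvMem_remove_unfold]
  constructor
  · rintro ⟨⟨op, hopmem, hcond, hx⟩, hnol⟩
    obtain ⟨j, hj, rfl, hjop⟩ := pvMem_ol.mp hopmem
    have hble := pvBn_le L j (by omega)
    have hfle := pvFn_le L j
    rw [PySem.List.mem_pyRange_one] at hx
    unfold pvStridePair at hx
    dsimp only at hx
    rw [pvFirst_eq, pvLast_eq] at hx hcond
    -- turn the two conditional endpoints into plain bounds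
    have hx' : ((j : Int) - (pvBn L j : Int) ≤ x ∧ x ≤ (j : Int) + (pvFn L j : Int)) ∧
        (pvBn L j = 0 → (j : Int) < x) ∧ (pvFn L j = 0 → x < (j : Int)) := by
      by_cases hbz : pvBn L j = 0
      · rw [if_neg (show ¬ ((j : Int) - (pvBn L j : Int) ≠ (j : Int)) by omega)] at hx
        by_cases hfz : pvFn L j = 0
        · rw [hbz, hfz] at hcond
          simp at hcond
        · rw [if_pos (show (j : Int) + (pvFn L j : Int) ≠ (j : Int) by omega)] at hx
          refine ⟨⟨by omega, by omega⟩, fun _ => by omega, fun h => absurd h hfz⟩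
      · rw [if_pos (show (j : Int) - (pvBn L j : Int) ≠ (j : Int) by omega)] at hx
        by_cases hfz : pvFn L j = 0
        · rw [if_neg (show ¬ ((j : Int) + (pvFn L j : Int) ≠ (j : Int)) by omega)] at hx
          refine ⟨⟨by omega, by omega⟩, fun h => absurd h hbz, fun _ => by omega⟩
        · rw [if_pos (show (j : Int) + (pvFn L j : Int) ≠ (j : Int) by omega)] at hx
          refine ⟨⟨by omega, by omega⟩, fun h => absurd h hbz, fun h => absurd h hfz⟩
    rcases lt_trichotomy x (j : Int) with hlt | heq | hgt
    · -- x lies in the backward space run of op j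
      have hbz : pvBn L j ≠ 0 := fun h0 => by have := hx'.2.1 h0; omega
      have hx0 : (0 : Int) ≤ x := by
        have : (pvBn L j : Int) ≤ (j : Int) := by exact_mod_cast hble
        omega
      obtain ⟨i, rfl⟩ : ∃ i : Nat, x = (i : Int) := ⟨x.toNat, (Int.toNat_of_nonneg hx0).symm⟩
      have hi1 : j - pvBn L j ≤ i ∧ i < j := by omega
      have hisp : L[i]? = some ' ' := pvSpaces_left L j (by omega) i hi1.1 hi1.2
      have hright : pvOpAfter (L.drop (i + 1)) = true :=
        pvOpAfter_right hi1.2 hj (fun m h1 h2 => pvSpaces_left L j (by omega) m (by omega) h2) hjop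
      exact ⟨i, rfl, by simp [pvRem, hisp, hright]⟩
    · exact absurd hopmem (heq ▸ hnol)
    · -- x lies in the forward space run of op j
      have hfz : pvFn L j ≠ 0 := fun h0 => by have := hx'.2.2 h0; omega
      obtain ⟨i, rfl⟩ : ∃ i : Nat, x = (i : Int) := ⟨x.toNat, (Int.toNat_of_nonneg (by omega)).symm⟩
      have hi1 : j + 1 ≤ i ∧ i < j + 1 + pvFn L j := by omega
      have hisp : L[i]? = some ' ' := pvSpaces_right L j i hi1.1 hi1.2
      have hleft : pvOpAfter ((L.take i).reverse) = true :=
        pvOpAfter_left (by omega) (by omega) hj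
          (fun m h1 h2 => pvSpaces_right L j m h1 (by omega)) hjop
      exact ⟨i, rfl, by simp [pvRem, hisp, hleft]⟩
  · rintro ⟨i, rfl, hrem⟩
    unfold pvRem at hrem
    rw [Bool.and_eq_true, beq_iff_eq, Bool.or_eq_true] at hrem
    obtain ⟨hi, hadj⟩ := hrem
    have hiL : i < L.length := by
      rcases List.getElem?_eq_some_iff.mp hi with ⟨h, _⟩; exact h
    have hival : L[i] = ' ' := by
      rcases List.getElem?_eq_some_iff.mp hi with ⟨h, hv⟩; exact hv
    have hinol : ¬ (i : Int) ∈ (pvPass1 L).2.1 := by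
      intro h
      obtain ⟨j', hj', he, hjop'⟩ := pvMem_ol.mp h
      have : j' = i := by omega
      subst this
      exact pvOpsA_ne_space hjop' hival
    rcases hadj with hr | hl
    · -- operator to the right
      obtain ⟨c, hc, hcA⟩ := (pvOpAfter_eq_true_iff _).mp hr
      set m := pvLead (L.drop (i + 1)) with hm
      rw [List.getElem?_drop] at hc
      obtain ⟨hjL, hjval⟩ := List.getElem?_eq_some_iff.mp hc
      set j := i + 1 + m with hjdef
      have hjop : L[j] ∈ pvOperatorsA := by rw [hjval]; exact hcA
      have hble : j - i ≤ pvBn L j := by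
        apply pvLead_ge_of
        intro k hk
        rw [pvRevTake_getElem? (by omega) (by omega)]
        by_cases hki : j - 1 - k = i
        · rw [hki]; exact hi
        · have h2 : j - 1 - k - (i + 1) < m := by omega
          have := getElem?_of_lt_pvLead (xs := L.drop (i + 1)) h2
          rw [List.getElem?_drop] at this
          rwa [show i + 1 + (j - 1 - k - (i + 1)) = j - 1 - k from by omega] at this
      refine ⟨⟨(j : Int), pvMem_ol.mpr ⟨j, hjL, rfl, hjop⟩, ?_, ?_⟩, hinol⟩
      · rw [pvFirst_eq]
        left
        omega
      · unfold pvStridePair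
        rw [PySem.List.mem_pyRange_one]
        dsimp only
        rw [pvFirst_eq, pvLast_eq]
        have hble' : ((j : Int) - (pvBn L j : Int)) ≤ (i : Int) := by
          have : (j - i : Nat) ≤ pvBn L j := hble
          omega
        constructor
        · rw [if_pos (show (j : Int) - (pvBn L j : Int) ≠ (j : Int) by omega)]
          exact hble'
        · by_cases hfz : pvFn L j = 0
          · rw [if_neg (show ¬ ((j : Int) + (pvFn L j : Int) ≠ (j : Int)) by omega)]
            omega
          · rw [if_pos (show (j : Int) + (pvFn L j : Int) ≠ (j : Int) by omega)]
            omega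
    · -- operator to the left
      obtain ⟨c, hc, hcA⟩ := (pvOpAfter_eq_true_iff _).mp hl
      set m := pvLead ((L.take i).reverse) with hm
      have hmi : m < i := by
        obtain ⟨h, _⟩ := List.getElem?_eq_some_iff.mp hc
        rw [List.length_reverse, List.length_take] at h
        omega
      rw [pvRevTake_getElem? hmi (by omega)] at hc
      obtain ⟨hjL, hjval⟩ := List.getElem?_eq_some_iff.mp hc
      set j := i - 1 - m with hjdef
      have hjop : L[j] ∈ pvOperatorsA := by rw [hjval]; exact hcA
      have hfle : i - j ≤ pvFn L j := by
        apply pvLead_ge_of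
        intro k hk
        rw [List.getElem?_drop]
        by_cases hki : j + 1 + k = i
        · rw [hki]; exact hi
        · have h2 : m - 1 - k < m := by omega
          have := getElem?_of_lt_pvLead (xs := (L.take i).reverse) (lt_of_lt_of_le h2 (le_of_eq hm))
          rw [pvRevTake_getElem? (by omega) (by omega)] at this
          rwa [show i - 1 - (m - 1 - k) = j + 1 + k from by omega] at this
      refine ⟨⟨(j : Int), pvMem_ol.mpr ⟨j, by omega, rfl, hjop⟩, ?_, ?_⟩, hinol⟩
      · rw [pvLast_eq]
        right
        omega
      · unfold pvStridePair
        rw [PySem.List.mem_pyRange_one]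
        dsimp only
        rw [pvFirst_eq, pvLast_eq]
        have hfle' : (i : Int) ≤ (j : Int) + (pvFn L j : Int) := by
          have : (i - j : Nat) ≤ pvFn L j := hfle
          omega
        constructor
        · by_cases hbz : pvBn L j = 0
          · rw [if_neg (show ¬ ((j : Int) - (pvBn L j : Int) ≠ (j : Int)) by omega)]
            omega
          · rw [if_pos (show (j : Int) - (pvBn L j : Int) ≠ (j : Int) by omega)]
            omega
        · rw [if_pos (show (j : Int) + (pvFn L j : Int) ≠ (j : Int) by omega)]
          omega

-- ---- A's final pass produces pvMidFrom

lemma pvA_filter (L : List Char) (t : List Char) (k : Nat) (ht : t = L.drop k) :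
    ((PySem.List.enumerate t (k : Int)).filter
        (fun p => ¬ p.1 ∈ pvRemoveIndices L)).map (fun p => p.2) = pvMidFrom L k := by
  induction t generalizing k with
  | nil =>
    have hk : ¬ k < L.length := by
      have := ht.symm
      rw [List.drop_eq_nil_iff] at this
      omega
    simp [PySem.List.enumerate_nil, pvMidFrom, hk]
  | cons c t ih =>
    have hk : k < L.length := by
      by_contra h
      rw [List.drop_eq_nil_of_le (by omega)] at ht
      exact (List.cons_ne_nil c t) ht
    have hc : L[k] = c := by
      have := congrArg (fun l => l[0]?) ht
      simpa [List.getElem?_drop, List.getElem?_eq_getElem hk] using this.symm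
    have ht' : t = L.drop (k + 1) := by
      have := congrArg List.tail ht
      simpa [List.tail_drop] using this
    have hmem : ((k : Int) ∈ pvRemoveIndices L) ↔ pvRem L k = true := by
      rw [pvMem_remove_iff]
      constructor
      · rintro ⟨i, hi, hr⟩
        have : k = i := by omega
        subst this; exact hr
      · intro h; exact ⟨k, rfl, h⟩
    rw [PySem.List.enumerate_cons]
    have hcast : (k : Int) + 1 = ((k + 1 : Nat) : Int) := by push_cast; ring
    cases hr : pvRem L k with
    | true =>
      have : ¬ ¬ ((k : Int) ∈ pvRemoveIndices L) := by simp [hmem, hr]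
      simp only [List.filter_cons, decide_eq_true_eq]
      rw [if_neg (by simpa using this)]
      rw [hcast, ih (k + 1) ht']
      conv_rhs => rw [pvMidFrom]
      simp [hk, hr]
    | false =>
      have : ¬ ((k : Int) ∈ pvRemoveIndices L) := by simp [hmem, hr]
      simp only [List.filter_cons, decide_eq_true_eq]
      rw [if_pos (by simpa using this)]
      simp only [List.map_cons]
      rw [hcast, ih (k + 1) ht']
      conv_rhs => rw [pvMidFrom]
      simp [hk, hr, hc]

-- ---- B's loop equals pvSpecGo

lemma pvB_fold (t : List Char) (out : List Char) (pending : Nat) (prevOp : Bool) :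
    (let st := t.foldl pvAltStep (out, pending, prevOp)
     if st.2.1 ≠ 0 ∧ ¬ st.2.2 = true then st.1 ++ List.replicate st.2.1 ' ' else st.1)
      = out ++ pvSpecGo prevOp pending t := by
  induction t generalizing out pending prevOp with
  | nil =>
    simp only [List.foldl_nil, pvSpecGo]
    split_ifs with h <;> simp
  | cons c t ih =>
    simp only [List.foldl_cons]
    by_cases hc : c = ' '
    · have hstep : pvAltStep (out, pending, prevOp) c = (out, pending + 1, prevOp) := by
        simp [pvAltStep, hc]
      rw [hstep, ih]
      simp [pvSpecGo, hc]
    · by_cases hp : pending ≠ 0 ∧ ¬ prevOp = true ∧ ¬ c ∈ pvOperatorsB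
      · have hstep : pvAltStep (out, pending, prevOp) c
            = (out ++ List.replicate pending ' ' ++ [c], 0, decide (c ∈ pvOperatorsB)) := by
          simp [pvAltStep, hc, hp]
        rw [hstep, ih]
        simp only [pvSpecGo]
        rw [if_neg hc, if_pos hp]
        simp
      · have hstep : pvAltStep (out, pending, prevOp) c
            = (out ++ [c], 0, decide (c ∈ pvOperatorsB)) := by
          simp only [pvAltStep]
          rw [if_neg hc, if_neg hp]
        rw [hstep, ih]
        simp only [pvSpecGo]
        rw [if_neg hc, if_neg hp]
        simp

-- ---- pvMidFrom across a space run with a constant removal verdict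

lemma pvMidFrom_space_run_aux {L : List Char} (n : Nat) : ∀ {a b : Nat} (r : Bool),
    b - a = n → a ≤ b → b ≤ L.length →
    (∀ i, a ≤ i → i < b → L[i]? = some ' ') →
    (∀ i, a ≤ i → i < b → pvRem L i = r) →
    pvMidFrom L a = (if r then [] else List.replicate (b - a) ' ') ++ pvMidFrom L b := by
  induction n with
  | zero =>
    intro a b r hn hab hb hsp hrem
    have hba : b = a := by omega
    subst hba
    simp
  | succ n ih =>
    intro a b r hn hab hb hsp hrem
    have ha : a < b := by omega
    have haL : a < L.length := by omega
    rw [pvMidFrom, dif_pos haL, hrem a (le_refl a) ha]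
    have hrest : pvMidFrom L (a + 1) = (if r then [] else List.replicate (b - (a + 1)) ' ') ++ pvMidFrom L b :=
      ih r (by omega) (by omega) hb (fun i h1 h2 => hsp i (by omega) h2)
        (fun i h1 h2 => hrem i (by omega) h2)
    have hsa : L[a] = ' ' := by
      have := hsp a (le_refl a) ha
      rw [List.getElem?_eq_getElem haL] at this
      simpa using this
    cases r with
    | true => simpa using hrest
    | false =>
      simp only at hrest ⊢
      rw [if_neg (by simp), hrest, hsa]
      have : b - a = (b - (a + 1)) + 1 := by omega
      rw [this, List.replicate_succ]
      simp

lemma pvMidFrom_space_run {L : List Char} {a b : Nat} (r : Bool) (hab : a ≤ b) (hb : b ≤ L.length)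
    (hsp : ∀ i, a ≤ i → i < b → L[i]? = some ' ')
    (hrem : ∀ i, a ≤ i → i < b → pvRem L i = r) :
    pvMidFrom L a = (if r then [] else List.replicate (b - a) ' ') ++ pvMidFrom L b :=
  pvMidFrom_space_run_aux (b - a) r rfl hab hb hsp hrem

-- ---- helper facts for the bridge

lemma pvMidFrom_end {L : List Char} {k : Nat} (h : L.length ≤ k) : pvMidFrom L k = [] := by
  rw [pvMidFrom, dif_neg (by omega)]

lemma pvMemB_iff (c : Char) : c ∈ pvOperatorsB ↔ c ∈ pvOperatorsA := by
  rw [pvOperatorsB, PySem.Set.mem_ofList,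
    show ",*/^+-{}()[]".toList = pvOperatorsA from rfl]

lemma pvRem_of_run {L : List Char} {a i k : Nat} (hai : a ≤ i) (hik : i < k) (hk : k ≤ L.length)
    (hsp : ∀ m, a ≤ m → m < k → L[m]? = some ' ') :
    pvRem L i = (pvOpAfter (L.drop k) || pvOpAfter ((L.take a).reverse)) := by
  have hdrop : L.drop (i + 1) = List.replicate (k - (i + 1)) ' ' ++ L.drop k :=
    pvSpacesDrop (by omega) hk (fun m h1 h2 => hsp m (by omega) h2)
  have htake : L.take i = L.take a ++ List.replicate (i - a) ' ' :=
    pvSpacesTake hai (by omega) (fun m h1 h2 => hsp m h1 (by omega))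
  have hi : L[i]? = some ' ' := hsp i hai hik
  unfold pvRem
  rw [hdrop, htake, pvOpAfter_replicate_append, List.reverse_append, List.reverse_replicate,
    pvOpAfter_replicate_append, hi]
  simp

-- ---- the main bridge: pvSpecGo computes pvMidFrom

lemma pvSpec_eq_midFrom (L : List Char) (n k pending : Nat) (prevOp : Bool)
    (hn : n = L.length - k)
    (hk : k ≤ L.length) (hp : pending ≤ k)
    (hsp : ∀ i, k - pending ≤ i → i < k → L[i]? = some ' ')
    (hprev : pvOpAfter ((L.take (k - pending)).reverse) = prevOp) :
    pvSpecGo prevOp pending (L.drop k) = pvMidFrom L (k - pending) := by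
  induction n generalizing k pending prevOp with
  | zero =>
    have hnil : L.drop k = [] := List.drop_eq_nil_of_le (by omega)
    rw [hnil]
    have hrun : pvMidFrom L (k - pending)
        = (if prevOp then [] else List.replicate (k - (k - pending)) ' ') ++ pvMidFrom L k := by
      apply pvMidFrom_space_run prevOp (by omega) (by omega) (fun i h1 h2 => hsp i h1 h2)
      intro i h1 h2
      rw [pvRem_of_run h1 h2 (by omega) hsp, hprev, hnil]
      simp [pvOpAfter]
    rw [hrun, pvMidFrom_end (by omega), show k - (k - pending) = pending from by omega]
    cases prevOp with
    | true => simp [pvSpecGo]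
    | false =>
      by_cases hp : pending = 0 <;> simp [pvSpecGo, hp]
  | succ n ih =>
    have hkl : k < L.length := by omega
    rw [List.drop_eq_getElem_cons hkl]
    by_cases hc : L[k] = ' '
    · simp only [pvSpecGo]
      rw [if_pos hc]
      have e : k + 1 - (pending + 1) = k - pending := by omega
      have hres := ih (k + 1) (pending + 1) prevOp (by omega) (by omega) (by omega)
        (by
          intro i h1 h2
          by_cases hik : i < k
          · exact hsp i (by omega) hik
          · have : i = k := by omega
            subst this
            rw [List.getElem?_eq_getElem hkl, hc]) (by rw [e]; exact hprev)
      rw [e] at hres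
      exact hres
    · simp only [pvSpecGo]
      rw [if_neg hc]
      have hdk : L.drop k = L[k] :: L.drop (k + 1) := List.drop_eq_getElem_cons hkl
      have hopk : pvOpAfter (L.drop k) = decide (L[k] ∈ pvOperatorsA) := by
        rw [hdk]
        simp [pvOpAfter, hc]
      have hrun : pvMidFrom L (k - pending)
          = (if (decide (L[k] ∈ pvOperatorsA) || prevOp) then []
             else List.replicate (k - (k - pending)) ' ') ++ pvMidFrom L k := by
        apply pvMidFrom_space_run _ (by omega) (by omega) (fun i h1 h2 => hsp i h1 h2)
        intro i h1 h2
        rw [pvRem_of_run h1 h2 (by omega) hsp, hprev, hopk]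
      have hremk : pvRem L k = false := by
        simp [pvRem, List.getElem?_eq_getElem hkl, hc]
      have hmidk : pvMidFrom L k = L[k] :: pvMidFrom L (k + 1) := by
        rw [pvMidFrom, dif_pos hkl, hremk]
        simp
      have hmid1 : pvSpecGo (decide (L[k] ∈ pvOperatorsB)) 0 (L.drop (k + 1)) = pvMidFrom L (k + 1) := by
        have := ih (k + 1) 0 (decide (L[k] ∈ pvOperatorsB)) (by omega) (by omega) (by omega)
          (by intro i h1 h2; omega)
          (by
            rw [show k + 1 - 0 = k + 1 from rfl, pvTakeSucc_reverse hkl]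
            simp only [pvOpAfter, hc]
            simp [pvMemB_iff])
        simpa using this
      rw [hmid1, hrun, hmidk, show k - (k - pending) = pending from by omega]
      by_cases hb : L[k] ∈ pvOperatorsA
      · have hb' : L[k] ∈ pvOperatorsB := (pvMemB_iff _).mpr hb
        simp [hb, hb']
      · have hb' : ¬ L[k] ∈ pvOperatorsB := fun h => hb ((pvMemB_iff _).mp h)
        cases prevOp with
        | true => simp [hb, hb']
        | false =>
          by_cases hp : pending = 0 <;> simp [hb, hb', hp]

-- ===== VERDICT (by name: the statement is the Claim_ definition above) =====
theorem min_remove_useless_space_spec : Claim_equal_min_remove_useless_space := by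
  unfold Claim_equal_min_remove_useless_space Spec_min_remove_useless_space
  intro s _
  have hA := pvA_filter s.toList s.toList 0 (by simp)
  have hB := pvB_fold s.toList [] 0 false
  have hS := pvSpec_eq_midFrom s.toList s.toList.length 0 0 false (by omega) (by omega) (by omega)
    (fun i h1 h2 => absurd h2 (by omega)) (by simp [pvOpAfter])
  rw [List.drop_zero] at hS
  exact congrArg String.mk (hA.trans (hS.symm.trans ((hB.trans (List.nil_append _)).symm)))
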